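-- pv_equiv track=rewrite | github.com/nelson-niser/8th_sem_Comp_Phys | library.py | sumbasis1
-- ===== SOURCE A (Python) =====
-- def basis(deg,x):
--     if (deg == 0):
--         return (1)
--     elif (deg == 1):
--         return (2*x - (1))
--     elif (deg == 2):
--         return ((8*x**2) - (8*x) + 1)
--     elif (deg == 3):
--         return ((32*x**3) - (48*x**2) + (18*x) - 1)
--     elif (deg == 4):
--         return (2*x - (1))
--     elif (deg == 5):
--         return (2*x - (1))*(2*x - (1))
--     elif (deg == 6):
--         return (2*x - (1))*((8*x**2) - (8*x) + 1)
--     elif (deg == 7):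
--         return (2*x - (1))*((32*x**3) - (48*x**2) + (18*x) - 1)
--     elif (deg == 8):
--         return ((8*x**2) - (8*x) + 1)
--     elif (deg == 9):
--         return ((8*x**2) - (8*x) + 1)*(2*x - (1))
--     elif (deg == 10):
--         return ((8*x**2) - (8*x) + 1)*((8*x**2) - (8*x) + 1)
--     elif (deg == 11):
--         return ((8*x**2) - (8*x) + 1)*((32*x**3) - (48*x**2) + (18*x) - 1)
--     elif (deg == 12):
--         return ((32*x**3) - (48*x**2) + (18*x) - 1)
--     elif (deg == 13):
--         return ((32*x**3) - (48*x**2) + (18*x) - 1)*(2*x - (1))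
--     elif (deg == 14):
--         return ((32*x**3) - (48*x**2) + (18*x) - 1)*((8*x**2) - (8*x) + 1)
--     elif (deg == 15):
--         return ((32*x**3) - (48*x**2) + (18*x) - 1)*((32*x**3) - (48*x**2) + (18*x) - 1)
--     else:
--         return 0
--
-- def sumbasis1(X, n):
--     n = n + 1
--     suMatrix = []
--     j = 0
--     while j<n*n:
--         sums = 0
--         i = 0
--         while i< len(X):
--             sums = sums + (basis(j, X[i]))
--             i = i + 1
--         suMatrix.append(sums)
--         j = j+1
--     return suMatrix
-- ===== SOURCE B (Python) =====
-- # Moment method: one pass over X accumulates the power sums s_d = sum(x**d, d=0..6);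
-- # each of the at most 16 nonzero-degree outputs is then a constant-coefficient linear
-- # combination of those power sums (the expanded product polynomial), the rest are 0.
-- _COEFF = [
--     (1, 0, 0, 0, 0, 0, 0),
--     (-1, 2, 0, 0, 0, 0, 0),
--     (1, -8, 8, 0, 0, 0, 0),
--     (-1, 18, -48, 32, 0, 0, 0),
--     (-1, 2, 0, 0, 0, 0, 0),
--     (1, -4, 4, 0, 0, 0, 0),
--     (-1, 10, -24, 16, 0, 0, 0),
--     (1, -20, 84, -128, 64, 0, 0),
--     (1, -8, 8, 0, 0, 0, 0),
--     (-1, 10, -24, 16, 0, 0, 0),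
--     (1, -16, 80, -128, 64, 0, 0),
--     (-1, 26, -200, 560, -640, 256, 0),
--     (-1, 18, -48, 32, 0, 0, 0),
--     (1, -20, 84, -128, 64, 0, 0),
--     (-1, 26, -200, 560, -640, 256, 0),
--     (1, -36, 420, -1792, 3456, -3072, 1024),
-- ]
--
-- def sumbasis1(X, n):
--     m = (n + 1) * (n + 1)
--     S = (0, 0, 0, 0, 0, 0, 0)
--     for x in X:
--         s0, s1, s2, s3, s4, s5, s6 = S
--         S = (s0 + 1, s1 + x, s2 + x * x, s3 + x ** 3, s4 + x ** 4, s5 + x ** 5, s6 + x ** 6)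
--     s0, s1, s2, s3, s4, s5, s6 = S
--     out = []
--     for j in range(min(16, m)):
--         c0, c1, c2, c3, c4, c5, c6 = _COEFF[j]
--         out.append(c0 * s0 + c1 * s1 + c2 * s2 + c3 * s3 + c4 * s4 + c5 * s5 + c6 * s6)
--     out.extend([0] * (m - min(16, m)))
--     return out
-- ===== Notes on version B (the rewrite author's own statement) =====
-- stated objective: faster
-- what changed: B replaces A's per-degree scans of X by the moment method: one pass over X accumulates the seven power sums sum(x**d) (d=0..6), and every nonzero-degree output (basis is a degree-<=6 polynomial for deg<16 and 0 beyond) is a constant-coefficient linear combination of those power sums; the remaining (n+1)^2-16 entries are literal zeros.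
import Mathlib
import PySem

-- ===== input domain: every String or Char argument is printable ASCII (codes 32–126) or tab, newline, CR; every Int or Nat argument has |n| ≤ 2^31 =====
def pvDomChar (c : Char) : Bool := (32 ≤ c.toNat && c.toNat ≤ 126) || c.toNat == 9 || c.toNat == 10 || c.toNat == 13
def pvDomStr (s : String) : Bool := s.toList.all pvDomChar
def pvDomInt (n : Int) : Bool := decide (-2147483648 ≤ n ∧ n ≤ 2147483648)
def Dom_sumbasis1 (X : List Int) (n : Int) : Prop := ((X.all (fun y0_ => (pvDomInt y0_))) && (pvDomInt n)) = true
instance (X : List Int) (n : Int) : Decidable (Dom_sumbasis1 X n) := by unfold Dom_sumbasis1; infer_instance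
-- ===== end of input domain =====

-- B uses the moment method: one pass over X accumulates the power sums Σ x^d (d=0..6),
-- and each nonzero-degree output is a constant linear combination of them (faster; asymptotic).

-- ===== PORT A =====
def basisA (deg x : Int) : Int :=
  if deg = 0 then 1
  else if deg = 1 then 2*x - 1
  else if deg = 2 then 8*x^2 - 8*x + 1
  else if deg = 3 then 32*x^3 - 48*x^2 + 18*x - 1
  else if deg = 4 then 2*x - 1
  else if deg = 5 then (2*x - 1)*(2*x - 1)
  else if deg = 6 then (2*x - 1)*(8*x^2 - 8*x + 1)
  else if deg = 7 then (2*x - 1)*(32*x^3 - 48*x^2 + 18*x - 1)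
  else if deg = 8 then 8*x^2 - 8*x + 1
  else if deg = 9 then (8*x^2 - 8*x + 1)*(2*x - 1)
  else if deg = 10 then (8*x^2 - 8*x + 1)*(8*x^2 - 8*x + 1)
  else if deg = 11 then (8*x^2 - 8*x + 1)*(32*x^3 - 48*x^2 + 18*x - 1)
  else if deg = 12 then 32*x^3 - 48*x^2 + 18*x - 1
  else if deg = 13 then (32*x^3 - 48*x^2 + 18*x - 1)*(2*x - 1)
  else if deg = 14 then (32*x^3 - 48*x^2 + 18*x - 1)*(8*x^2 - 8*x + 1)
  else if deg = 15 then (32*x^3 - 48*x^2 + 18*x - 1)*(32*x^3 - 48*x^2 + 18*x - 1)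
  else 0

def sumbasis1 (X : List Int) (n : Int) : List Int :=
  let n1 := n + 1
  (PySem.List.pyRange 0 (n1*n1) 1).foldl
    (fun suMatrix j =>
      suMatrix ++ [(PySem.List.pyRange 0 (X.length : Int) 1).foldl
        (fun sums i => sums + basisA j (PySem.List.pyGetD X i 0)) 0])
    []

-- ===== PORT B =====
-- the constant table _COEFF (index j is always 0..15 where it is consulted)
def coeffRow (j : Int) : Int × Int × Int × Int × Int × Int × Int :=
  if j = 0 then (1, 0, 0, 0, 0, 0, 0)
  else if j = 1 then (-1, 2, 0, 0, 0, 0, 0)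
  else if j = 2 then (1, -8, 8, 0, 0, 0, 0)
  else if j = 3 then (-1, 18, -48, 32, 0, 0, 0)
  else if j = 4 then (-1, 2, 0, 0, 0, 0, 0)
  else if j = 5 then (1, -4, 4, 0, 0, 0, 0)
  else if j = 6 then (-1, 10, -24, 16, 0, 0, 0)
  else if j = 7 then (1, -20, 84, -128, 64, 0, 0)
  else if j = 8 then (1, -8, 8, 0, 0, 0, 0)
  else if j = 9 then (-1, 10, -24, 16, 0, 0, 0)
  else if j = 10 then (1, -16, 80, -128, 64, 0, 0)
  else if j = 11 then (-1, 26, -200, 560, -640, 256, 0)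
  else if j = 12 then (-1, 18, -48, 32, 0, 0, 0)
  else if j = 13 then (1, -20, 84, -128, 64, 0, 0)
  else if j = 14 then (-1, 26, -200, 560, -640, 256, 0)
  else (1, -36, 420, -1792, 3456, -3072, 1024)

def sumbasis1_alt (X : List Int) (n : Int) : List Int :=
  let m := (n + 1) * (n + 1)
  let S := X.foldl
    (fun S x => match S with
      | (s0, s1, s2, s3, s4, s5, s6) =>
        (s0 + 1, s1 + x, s2 + x*x, s3 + x^3, s4 + x^4, s5 + x^5, s6 + x^6))
    (((0:Int), (0:Int), (0:Int), (0:Int), (0:Int), (0:Int), (0:Int)))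
  match S with
  | (s0, s1, s2, s3, s4, s5, s6) =>
    ((PySem.List.pyRange 0 (min 16 m) 1).foldl
      (fun out j =>
        out ++ [match coeffRow j with
          | (c0, c1, c2, c3, c4, c5, c6) =>
            c0*s0 + c1*s1 + c2*s2 + c3*s3 + c4*s4 + c5*s5 + c6*s6])
      [])
    ++ List.replicate (m - min 16 m).toNat 0

-- ===== PRECONDITION & SPEC =====
def Spec_sumbasis1 (X : List Int) (n : Int) (out : List Int) : Prop := out = sumbasis1_alt X n
instance (X : List Int) (n : Int) (out : List Int) : Decidable (Spec_sumbasis1 X n out) := by unfold Spec_sumbasis1; infer_instance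

-- ===== CLAIM (what is proved, stated in full; the proofs are below) =====
def Claim_equal_sumbasis1 : Prop := ∀ (X : List Int) (n : Int), Dom_sumbasis1 X n → Spec_sumbasis1 X n (sumbasis1 X n)

-- ===== LEMMAS AND PROOFS =====

-- the d-th power sum of X
def pwr (d : Nat) (X : List Int) : Int := (X.map (fun x => x ^ d)).sum

theorem pwr_cons (d : Nat) (x : Int) (t : List Int) : pwr d (x :: t) = x ^ d + pwr d t := by
  simp [pwr]

-- B's accumulation loop computes exactly the seven power sums
theorem mom_fold (X : List Int) (a0 a1 a2 a3 a4 a5 a6 : Int) :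
    X.foldl
      (fun S x => match S with
        | (s0, s1, s2, s3, s4, s5, s6) =>
          (s0 + 1, s1 + x, s2 + x*x, s3 + x^3, s4 + x^4, s5 + x^5, s6 + x^6))
      ((a0, a1, a2, a3, a4, a5, a6)) =
    (a0 + pwr 0 X, a1 + pwr 1 X, a2 + pwr 2 X, a3 + pwr 3 X,
     a4 + pwr 4 X, a5 + pwr 5 X, a6 + pwr 6 X) := by
  induction X generalizing a0 a1 a2 a3 a4 a5 a6 with
  | nil => simp [pwr]
  | cons x t ih =>
    simp only [List.foldl_cons, ih, pwr_cons]
    refine Prod.ext ?_ (Prod.ext ?_ (Prod.ext ?_ (Prod.ext ?_ (Prod.ext ?_ (Prod.ext ?_ ?_))))) <;>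
      simp <;> ring

-- the sum over X of a degree-≤6 polynomial is the same linear combination of power sums
theorem sum_poly (c0 c1 c2 c3 c4 c5 c6 : Int) (f : Int → Int)
    (h : ∀ x, f x = c0 + c1*x + c2*(x*x) + c3*x^3 + c4*x^4 + c5*x^5 + c6*x^6)
    (X : List Int) :
    (X.map f).sum =
      c0 * pwr 0 X + c1 * pwr 1 X + c2 * pwr 2 X + c3 * pwr 3 X +
      c4 * pwr 4 X + c5 * pwr 5 X + c6 * pwr 6 X := by
  induction X with
  | nil => simp [pwr]
  | cons x t ih =>
    simp only [List.map_cons, List.sum_cons, ih, pwr_cons, h]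
    ring

theorem basisA_eq_zero (j x : Int) (h : 16 ≤ j) : basisA j x = 0 := by
  unfold basisA
  rw [if_neg (show ¬(j = 0) by omega), if_neg (show ¬(j = 1) by omega), if_neg (show ¬(j = 2) by omega), if_neg (show ¬(j = 3) by omega), if_neg (show ¬(j = 4) by omega), if_neg (show ¬(j = 5) by omega), if_neg (show ¬(j = 6) by omega), if_neg (show ¬(j = 7) by omega), if_neg (show ¬(j = 8) by omega), if_neg (show ¬(j = 9) by omega), if_neg (show ¬(j = 10) by omega), if_neg (show ¬(j = 11) by omega), if_neg (show ¬(j = 12) by omega), if_neg (show ¬(j = 13) by omega), if_neg (show ¬(j = 14) by omega), if_neg (show ¬(j = 15) by omega)]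

theorem foldl_const_zero (X : List Int) (s : Int) :
    X.foldl (fun s (_ : Int) => s + (0:Int)) s = s := by
  induction X generalizing s with
  | nil => rfl
  | cons a t ih => rw [List.foldl_cons, Int.add_zero]; exact ih s

-- for each degree j < 16, A's sum over X equals B's linear combination of power sums
theorem head_eq (j : Int) (h0 : 0 ≤ j) (h1 : j < 16) (X : List Int) :
    (X.map (basisA j)).sum =
      (match coeffRow j with
        | (c0, c1, c2, c3, c4, c5, c6) =>
          c0 * pwr 0 X + c1 * pwr 1 X + c2 * pwr 2 X + c3 * pwr 3 X +
          c4 * pwr 4 X + c5 * pwr 5 X + c6 * pwr 6 X) := by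
  interval_cases j <;>
    (first
      | rw [(by decide : coeffRow 0 = ((1:Int), 0, 0, 0, 0, 0, 0))]
      | rw [(by decide : coeffRow 1 = ((-1:Int), 2, 0, 0, 0, 0, 0))]
      | rw [(by decide : coeffRow 2 = ((1:Int), -8, 8, 0, 0, 0, 0))]
      | rw [(by decide : coeffRow 3 = ((-1:Int), 18, -48, 32, 0, 0, 0))]
      | rw [(by decide : coeffRow 4 = ((-1:Int), 2, 0, 0, 0, 0, 0))]
      | rw [(by decide : coeffRow 5 = ((1:Int), -4, 4, 0, 0, 0, 0))]
      | rw [(by decide : coeffRow 6 = ((-1:Int), 10, -24, 16, 0, 0, 0))]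
      | rw [(by decide : coeffRow 7 = ((1:Int), -20, 84, -128, 64, 0, 0))]
      | rw [(by decide : coeffRow 8 = ((1:Int), -8, 8, 0, 0, 0, 0))]
      | rw [(by decide : coeffRow 9 = ((-1:Int), 10, -24, 16, 0, 0, 0))]
      | rw [(by decide : coeffRow 10 = ((1:Int), -16, 80, -128, 64, 0, 0))]
      | rw [(by decide : coeffRow 11 = ((-1:Int), 26, -200, 560, -640, 256, 0))]
      | rw [(by decide : coeffRow 12 = ((-1:Int), 18, -48, 32, 0, 0, 0))]
      | rw [(by decide : coeffRow 13 = ((1:Int), -20, 84, -128, 64, 0, 0))]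
      | rw [(by decide : coeffRow 14 = ((-1:Int), 26, -200, 560, -640, 256, 0))]
      | rw [(by decide : coeffRow 15 = ((1:Int), -36, 420, -1792, 3456, -3072, 1024))]) <;>
    exact sum_poly _ _ _ _ _ _ _ _ (by intro x; simp only [basisA]; norm_num; try ring) X

theorem sumbasis1_spec_aux (X : List Int) (n : Int) : sumbasis1 X n = sumbasis1_alt X n := by
  unfold sumbasis1 sumbasis1_alt
  simp only [mom_fold, zero_add]
  set m := (n + 1) * (n + 1) with hm
  have hm0 : 0 ≤ m := mul_self_nonneg _
  set k := min 16 m with hk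
  have hk0 : 0 ≤ k := by omega
  have hkm : k ≤ m := by omega
  rw [PySem.List.foldl_append_singleton_eq_map, PySem.List.foldl_append_singleton_eq_map,
      List.nil_append, List.nil_append,
      PySem.List.pyRange_one_append 0 k m hk0 hkm, List.map_append]
  congr 1
  · -- the first k entries agree
    refine List.map_congr_left (fun j hj => ?_)
    have hjb := (PySem.List.mem_pyRange_one).1 hj
    rw [PySem.List.foldl_pyRange_zero_pyGetD' X 0 (fun sums x => sums + basisA j x) 0,
        PySem.List.foldl_add, zero_add, head_eq j hjb.1 (by omega)]
  · -- remaining entries are all zero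
    have hzero : ∀ j ∈ PySem.List.pyRange k m 1,
        (PySem.List.pyRange 0 (X.length : Int) 1).foldl
          (fun sums i => sums + basisA j (PySem.List.pyGetD X i 0)) 0 = (0 : Int) := by
      intro j hj
      have hjb := (PySem.List.mem_pyRange_one).1 hj
      have h16 : 16 ≤ j := by
        have : k < m := lt_of_le_of_lt hjb.1 hjb.2
        omega
      rw [PySem.List.foldl_pyRange_zero_pyGetD' X 0 (fun sums x => sums + basisA j x) 0]
      have : (fun (s x : Int) => s + basisA j x) = (fun s (_ : Int) => s + 0) := by
        funext s x; rw [basisA_eq_zero j x h16]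
      rw [this, foldl_const_zero]
    calc (PySem.List.pyRange k m 1).map
          (fun j => (PySem.List.pyRange 0 (X.length : Int) 1).foldl
            (fun sums i => sums + basisA j (PySem.List.pyGetD X i 0)) 0)
        = (PySem.List.pyRange k m 1).map (fun _ => (0:Int)) := List.map_congr_left hzero
      _ = List.replicate (m - k).toNat 0 := by
            rw [List.map_const', PySem.List.length_pyRange_one]

-- ===== VERDICT (by name: the statement is the Claim_ definition above) =====
theorem sumbasis1_spec : Claim_equal_sumbasis1 := by
  intro X n _
  unfold Spec_sumbasis1
  exact sumbasis1_spec_aux X n
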